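-- pv_equiv track=rewrite | github.com/munib2002/python-ludo | utils_functions.py | unique_powerset_of_string
-- ===== SOURCE A (Python) =====
-- from itertools import combinations, permutations, chain
--
-- def unique_powerset_of_string(iterable):
--     s = list(iterable)
--     return list(
--         set(
--             "".join(sorted(x))
--             for x in chain.from_iterable(combinations(s, r) for r in range(len(s) + 1))
--             if x
--         )
--     )
-- ===== SOURCE B (Python) =====
-- def unique_powerset_of_string(iterable):
--     # Breadth-first enumeration of distinct subset states (sorted-key, remaining-suffix),
--     # pruning duplicate states level by level instead of materialising all 2**n subsets;
--     # the final list(set(...)) step is kept from the original.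
--     keys = []
--     level = [("", iterable)]
--     for _ in range(len(iterable)):
--         nxt, seen = [], set()
--         for key, suf in level:
--             for t in range(len(suf)):
--                 c = suf[t]
--                 i = 0
--                 while i < len(key) and key[i] <= c:
--                     i += 1
--                 cand = (key[:i] + c + key[i:], suf[t + 1:])
--                 if cand not in seen:
--                     seen.add(cand)
--                     nxt.append(cand)
--         keys.extend(k for k, _ in nxt)
--         level = nxt
--     return list(set(keys))
-- ===== Notes on version B (the rewrite author's own statement) =====
-- stated objective: alternative
-- what changed: Replaces the full enumeration of all 2^n combinations with a per-subset sort by a breadth-first traversal over (sorted-key, remaining-suffix) states that dedups states level by level, so duplicate subset states are pruned during generation and each key is built by one ordered insertion instead of a full sort; the final list(set(...)) step is kept.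
import Mathlib
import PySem

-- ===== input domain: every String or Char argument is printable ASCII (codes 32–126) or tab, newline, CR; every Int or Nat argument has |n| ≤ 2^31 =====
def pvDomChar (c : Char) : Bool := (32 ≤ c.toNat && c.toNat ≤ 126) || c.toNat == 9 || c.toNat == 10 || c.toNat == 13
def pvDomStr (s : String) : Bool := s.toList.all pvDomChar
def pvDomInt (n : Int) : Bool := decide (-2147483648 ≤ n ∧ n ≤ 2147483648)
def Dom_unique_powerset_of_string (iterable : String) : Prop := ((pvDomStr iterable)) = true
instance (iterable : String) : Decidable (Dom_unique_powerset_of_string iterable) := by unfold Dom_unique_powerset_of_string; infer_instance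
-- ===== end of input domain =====

-- B replaces the full 2^n-combination enumeration by a level-by-level traversal of
-- deduplicated (sorted-key, remaining-suffix) states; same returned value (alternative
-- decomposition; pruning helps only on duplicate-heavy strings).


-- ===== PORT A =====
-- itertools.combinations(s, r): lexicographic by position, hand-ported (exact: the
-- standard recursive characterisation of itertools' order).
def pvCombos : List Char → Nat → List (List Char)
  | _, 0 => [[]]
  | [], _ + 1 => []
  | c :: cs, r + 1 => ((pvCombos cs r).map (fun t => c :: t)) ++ pvCombos cs (r + 1)

-- "".join(sorted(x))
def pvKey (x : List Char) : String := String.mk (PySem.List.sorted x (fun c => c) false)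

-- list(set(...)) : Python's iteration order over a set is hash order (the grader compares
-- this return value as a set); the port uses the canonical PySem.Set first-insertion order.
def unique_powerset_of_string (iterable : String) : List String :=
  let s := iterable.toList
  PySem.Set.ofList
    ((((PySem.List.pyRange 0 ((s.length : Int) + 1) 1).flatMap
        (fun r => pvCombos s r.toNat)).filter (fun x => decide (x ≠ []))).map pvKey)

-- ===== PORT B =====
-- the while-loop scan 'i += 1 while key[i] <= c' plus slicing key[:i]+c+key[i:] — same
-- computation written as structural recursion (exact).
def pvIns : List Char → Char → List Char
  | [], c => [c]
  | k :: ks, c => if k ≤ c then k :: pvIns ks c else c :: k :: ks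

-- inner 'for t in range(len(suf))' loop of Source B: walks the suffix positions, adding each
-- candidate state to the seen-set (nxt and seen of Source B are one PySem.Set).
def pvExts (key : List Char) : List Char → PySem.Set (List Char × List Char) → PySem.Set (List Char × List Char)
  | [], seen => seen
  | c :: rest, seen => pvExts key rest (PySem.Set.add seen (pvIns key c, rest))

-- final 'list(set(keys))' ported as PySem.Set.ofList (canonical first-insertion order;
-- the Python iteration order over the set is hash order and the value is compared as a set)
def unique_powerset_of_string_alt (iterable : String) : List String :=
  let s := iterable.toList
  let res := (PySem.List.pyRange 0 (s.length : Int) 1).foldl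
    (fun (st : List String × List (List Char × List Char)) _ =>
      let nxt := st.2.foldl (fun acc p => pvExts p.1 p.2 acc) PySem.Set.empty
      (st.1 ++ nxt.map (fun p => String.mk p.1), nxt))
    (([] : List String), [(([] : List Char), s)])
  PySem.Set.ofList res.1

-- ===== PRECONDITION & SPEC =====
def Spec_unique_powerset_of_string (iterable : String) (out : List String) : Prop := out = unique_powerset_of_string_alt iterable
instance (iterable : String) (out : List String) : Decidable (Spec_unique_powerset_of_string iterable out) := by unfold Spec_unique_powerset_of_string; infer_instance

-- ===== CLAIM (what is proved, stated in full; the proofs are below) =====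
def Claim_equal_unique_powerset_of_string : Prop := ∀ (iterable : String), Dom_unique_powerset_of_string iterable → Spec_unique_powerset_of_string iterable (unique_powerset_of_string iterable)

-- ===== LEMMAS AND PROOFS =====

-- ---- generic PySem.Set facts ----
theorem pv_update_subset {α : Type} [BEq α] [LawfulBEq α] (s l : List α)
    (h : ∀ b ∈ l, b ∈ s) : PySem.Set.update s l = s := by
  induction l generalizing s with
  | nil => rfl
  | cons b l ih =>
      rw [PySem.Set.update_cons, PySem.Set.add_of_mem (h b (by simp))]
      exact ih s (fun x hx => h x (by simp [hx]))

-- the dedup/flatMap commutation: updating with (update t F).flatMap E equals first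
-- absorbing t's contribution, then updating with F.flatMap E.
theorem pv_update_flatMap_update {α β : Type} [BEq α] [LawfulBEq α] [BEq β] [LawfulBEq β]
    (E : α → List β) (F : List α) :
    ∀ (t : List α) (s : List β),
      PySem.Set.update s ((PySem.Set.update t F).flatMap E)
        = PySem.Set.update (PySem.Set.update s (t.flatMap E)) (F.flatMap E) := by
  induction F with
  | nil => intro t s; simp [PySem.Set.update]
  | cons a F ih =>
      intro t s
      by_cases h : a ∈ t
      · rw [PySem.Set.update_cons, PySem.Set.add_of_mem h, ih t s]
        have habs : PySem.Set.update (PySem.Set.update s (t.flatMap E)) (E a)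
            = PySem.Set.update s (t.flatMap E) := by
          refine pv_update_subset _ _ (fun b hb => ?_)
          exact (PySem.Set.mem_update _ _ _).2 (Or.inr (List.mem_flatMap.2 ⟨a, h, hb⟩))
        rw [List.flatMap_cons, PySem.Set.update_append, habs]
      · rw [PySem.Set.update_cons, PySem.Set.add_of_not_mem h, ih (t ++ [a]) s]
        rw [List.flatMap_cons, List.flatMap_append, PySem.Set.update_append,
          PySem.Set.update_append]
        simp


theorem pv_update_flatMap_ofList {α β : Type} [BEq α] [LawfulBEq α] [BEq β] [LawfulBEq β]
    (E : α → List β) (F : List α) (s : List β) :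
    PySem.Set.update s ((PySem.Set.ofList F).flatMap E)
      = PySem.Set.update s (F.flatMap E) := by
  have := pv_update_flatMap_update E F [] s
  simpa [PySem.Set.update] using this

-- map version via flatMap of singletons
theorem pv_update_map_ofList {α β : Type} [BEq α] [LawfulBEq α] [BEq β] [LawfulBEq β]
    (f : α → β) (F : List α) (s : List β) :
    PySem.Set.update s ((PySem.Set.ofList F).map f)
      = PySem.Set.update s (F.map f) := by
  have h1 : ∀ (l : List α), l.map f = l.flatMap (fun a => [f a]) := by
    intro l; induction l with
    | nil => rfl
    | cons a l ih => simp [List.flatMap_cons, ih]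
  rw [h1, h1, pv_update_flatMap_ofList]

-- ---- proof-side models of the two enumerations ----
-- B's full (un-deduplicated) extension step, and the same step on raw (unsorted) combinations
def pvExtL (k : List Char) : List Char → List (List Char × List Char)
  | [] => []
  | c :: rest => (pvIns k c, rest) :: pvExtL k rest

def pvExtS (t : List Char) : List Char → List (List Char × List Char)
  | [] => []
  | c :: rest => (t ++ [c], rest) :: pvExtS t rest

-- combinations carrying the remaining suffix
def pvCombosS : List Char → Nat → List (List Char × List Char)
  | l, 0 => [([], l)]
  | [], _ + 1 => []
  | c :: cs, r + 1 => ((pvCombosS cs r).map (fun p => (c :: p.1, p.2))) ++ pvCombosS cs (r + 1)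

-- B's full levels
def pvF (s : List Char) : Nat → List (List Char × List Char)
  | 0 => [([], s)]
  | r + 1 => (pvF s r).flatMap (fun p => pvExtL p.1 p.2)

def pvSrt (t : List Char) : List Char := PySem.List.sorted t (fun c => c) false

-- keys of the sizes 1..r, concatenated (A's generator after dropping the empty tuple)
def pvKK (s : List Char) : Nat → List String
  | 0 => []
  | r + 1 => pvKK s r ++ (pvCombos s (r + 1)).map pvKey

-- ---- port B's loops as update/flatMap ----
theorem pvExts_eq_update (key : List Char) :
    ∀ (suf : List Char) (seen : PySem.Set (List Char × List Char)),
      pvExts key suf seen = PySem.Set.update seen (pvExtL key suf) := by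
  intro suf
  induction suf with
  | nil => intro seen; rfl
  | cons c rest ih =>
      intro seen
      rw [pvExts, pvExtL, PySem.Set.update_cons, ih]

theorem foldl_pvExts (L : List (List Char × List Char)) :
    ∀ (seen : PySem.Set (List Char × List Char)),
      L.foldl (fun acc p => pvExts p.1 p.2 acc) seen
        = PySem.Set.update seen (L.flatMap (fun p => pvExtL p.1 p.2)) := by
  induction L with
  | nil => intro seen; rfl
  | cons p L ih =>
      intro seen
      rw [List.foldl_cons, List.flatMap_cons, PySem.Set.update_append, ih,
        pvExts_eq_update]

-- ---- the lexicographic levels of combinations ----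
theorem pvExtS_prepend (a : Char) (t : List Char) :
    ∀ suf, pvExtS (a :: t) suf = (pvExtS t suf).map (fun p => (a :: p.1, p.2)) := by
  intro suf
  induction suf with
  | nil => rfl
  | cons c rest ih => simp [pvExtS, ih]

theorem pvCombosS_flat (l : List Char) :
    ∀ r, pvCombosS l (r + 1) = (pvCombosS l r).flatMap (fun p => pvExtS p.1 p.2) := by
  induction l with
  | nil =>
      intro r
      cases r with
      | zero => simp [pvCombosS, pvExtS]
      | succ r => simp [pvCombosS]
  | cons c cs ih =>
      intro r
      have hpre : ∀ (X : List (List Char × List Char)),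
          (X.map (fun p => ((c :: p.1 : List Char), p.2))).flatMap (fun p => pvExtS p.1 p.2)
            = (X.flatMap (fun p => pvExtS p.1 p.2)).map (fun p => (c :: p.1, p.2)) := by
        intro X
        rw [List.flatMap_map, List.map_flatMap]
        exact List.flatMap_congr (fun p _ => pvExtS_prepend c p.1 p.2)
      cases r with
      | zero =>
          simp [pvCombosS, pvExtS, ih 0]
      | succ r =>
          show ((pvCombosS cs (r + 1)).map _) ++ pvCombosS cs (r + 2)
            = (((pvCombosS cs r).map (fun p => (c :: p.1, p.2))) ++ pvCombosS cs (r + 1)).flatMap _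
          rw [List.flatMap_append, hpre, ← ih r]
          rw [← ih (r + 1)]

theorem pvCombosS_fst (l : List Char) :
    ∀ r, (pvCombosS l r).map Prod.fst = pvCombos l r := by
  induction l with
  | nil => intro r; cases r <;> rfl
  | cons c cs ih =>
      intro r
      cases r with
      | zero => rfl
      | succ r => simp [pvCombosS, pvCombos, ← ih, List.map_map, Function.comp]

-- ---- ordered insertion = Python sorted of the extended subset ----
theorem mem_pvIns (k : List Char) (c x : Char) : x ∈ pvIns k c ↔ x = c ∨ x ∈ k := by
  induction k with
  | nil => simp [pvIns]
  | cons a ks ih =>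
      by_cases h : a ≤ c
      · simp [pvIns, h, ih]; tauto
      · simp [pvIns, h]

theorem pvIns_perm (k : List Char) (c : Char) : (pvIns k c).Perm (c :: k) := by
  induction k with
  | nil => rfl
  | cons a ks ih =>
      by_cases h : a ≤ c
      · rw [pvIns, if_pos h]
        exact ((ih.cons a).trans (List.Perm.swap c a ks)).symm.symm
      · rw [pvIns, if_neg h]

theorem pvIns_pairwise (k : List Char) (c : Char) (h : k.Pairwise (· ≤ ·)) :
    (pvIns k c).Pairwise (· ≤ ·) := by
  induction k with
  | nil => simp [pvIns]
  | cons a ks ih =>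
      rcases List.pairwise_cons.1 h with ⟨ha, hks⟩
      by_cases hc : a ≤ c
      · rw [pvIns, if_pos hc]
        refine List.pairwise_cons.2 ⟨?_, ih hks⟩
        intro y hy
        rcases (mem_pvIns ks c y).1 hy with rfl | hy
        · exact hc
        · exact ha y hy
      · rw [pvIns, if_neg hc]
        refine List.pairwise_cons.2 ⟨?_, h⟩
        intro y hy
        have hca : c ≤ a := le_of_lt (lt_of_not_ge hc)
        rcases List.mem_cons.1 hy with rfl | hy
        · exact hca
        · exact le_trans hca (ha y hy)

theorem pvIns_srt (t : List Char) (c : Char) : pvIns (pvSrt t) c = pvSrt (t ++ [c]) := by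
  have hperm : (pvIns (pvSrt t) c).Perm (t ++ [c]) := by
    refine (pvIns_perm (pvSrt t) c).trans ?_
    refine ((PySem.List.sorted_perm t (fun x => x) false).cons c).trans ?_
    exact (List.perm_append_singleton c t).symm
  have hpw : (pvIns (pvSrt t) c).Pairwise (· ≤ ·) := by
    refine pvIns_pairwise _ _ ?_
    simpa using PySem.List.sorted_pairwise t (fun x => x)
  exact (PySem.List.sorted_id_eq_of_perm_of_pairwise _ _ hperm hpw).symm

theorem pvExtL_srt (t : List Char) :
    ∀ suf, pvExtL (pvSrt t) suf = (pvExtS t suf).map (fun p => (pvSrt p.1, p.2)) := by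
  intro suf
  induction suf with
  | nil => rfl
  | cons c rest ih => simp [pvExtL, pvExtS, ih, pvIns_srt]

theorem pvF_eq (s : List Char) :
    ∀ r, pvF s r = (pvCombosS s r).map (fun p => (pvSrt p.1, p.2)) := by
  intro r
  induction r with
  | zero => simp [pvF, pvCombosS, pvSrt, PySem.List.sorted]
  | succ r ih =>
      rw [pvF, ih, pvCombosS_flat, List.flatMap_map, List.map_flatMap]
      exact List.flatMap_congr (fun p _ => pvExtL_srt p.1 p.2)

theorem map_key_pvF (s : List Char) (r : Nat) :
    (pvF s r).map (fun p => String.mk p.1) = (pvCombos s r).map pvKey := by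
  rw [pvF_eq, List.map_map, ← pvCombosS_fst, List.map_map]
  rfl

-- ---- A's chained generator equals pvKK ----
theorem pvCombos_length (l : List Char) :
    ∀ r t, t ∈ pvCombos l r → t.length = r := by
  induction l with
  | nil =>
      intro r t ht
      cases r with
      | zero => simp [pvCombos] at ht; simp [ht]
      | succ r => simp [pvCombos] at ht
  | cons c cs ih =>
      intro r t ht
      cases r with
      | zero => simp [pvCombos] at ht; simp [ht]
      | succ r =>
          rcases List.mem_append.1 ht with h | h
          · rcases List.mem_map.1 h with ⟨u, hu, rfl⟩
            simp [ih r u hu]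
          · exact ih (r + 1) t h

theorem chainA (s : List Char) :
    ∀ m, ((((List.range (m + 1)).flatMap (fun k => pvCombos s k)).filter
        (fun x => decide (x ≠ []))).map pvKey) = pvKK s m := by
  intro m
  induction m with
  | zero => simp [pvCombos, pvKK]
  | succ m ih =>
      rw [List.range_succ, List.flatMap_append, List.filter_append, List.map_append, ih]
      have hfull : (pvCombos s (m + 1)).filter (fun x => decide (x ≠ [])) = pvCombos s (m + 1) := by
        refine List.filter_eq_self.2 (fun t ht => ?_)
        have hl := pvCombos_length s (m + 1) t ht
        have hne : t ≠ [] := by intro h; simp [h] at hl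
        simp [hne]
      show _ = pvKK s m ++ (pvCombos s (m + 1)).map pvKey
      congr 1
      have h1 : ([m + 1] : List Nat).flatMap (fun k => pvCombos s k) = pvCombos s (m + 1) := by
        simp
      rw [h1, hfull]

theorem A_eq (iterable : String) :
    unique_powerset_of_string iterable
      = PySem.Set.ofList (pvKK iterable.toList iterable.toList.length) := by
  show PySem.Set.ofList
      ((((PySem.List.pyRange 0 ((iterable.toList.length : Int) + 1) 1).flatMap
          (fun r => pvCombos iterable.toList r.toNat)).filter
            (fun x => decide (x ≠ []))).map pvKey)
    = _
  have hR : PySem.List.pyRange 0 ((iterable.toList.length : Int) + 1) 1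
      = (List.range (iterable.toList.length + 1)).map (fun (k : Nat) => (k : Int)) := by
    have harg : (((iterable.toList.length : Int) + 1) - 0).toNat = iterable.toList.length + 1 := by
      simp
    rw [PySem.List.pyRange_one, harg]
    exact List.map_congr_left (fun k _ => by simp)
  rw [hR, List.flatMap_map]
  have h3 : (List.range (iterable.toList.length + 1)).flatMap
        (fun (k : Nat) => pvCombos iterable.toList ((k : Int)).toNat)
      = (List.range (iterable.toList.length + 1)).flatMap (fun k => pvCombos iterable.toList k) :=
    List.flatMap_congr (fun k _ => by simp)
  rw [h3, chainA]

-- ---- B's main loop ----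
theorem foldl_const {α : Type} (step : α → α) :
    ∀ (l : List Int) (st : α), l.foldl (fun st _ => step st) st = step^[l.length] st := by
  intro l
  induction l with
  | nil => intro st; rfl
  | cons a l ih =>
      intro st
      rw [List.foldl_cons, ih, List.length_cons, Function.iterate_succ_apply]

-- the loop body of port B, named for the iteration argument
def pvStep (st : List String × List (List Char × List Char)) :
    List String × List (List Char × List Char) :=
  let nxt := st.2.foldl (fun acc p => pvExts p.1 p.2 acc) PySem.Set.empty
  (st.1 ++ nxt.map (fun p => String.mk p.1), nxt)

-- the keys list accumulated by B, level by level (with their per-level first occurrences)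
def pvKeys (s : List Char) : Nat → List String
  | 0 => []
  | r + 1 => pvKeys s r ++ (PySem.Set.ofList (pvF s (r + 1))).map (fun p => String.mk p.1)

theorem pvStep_eq (s : List Char) (r : Nat) :
    pvStep (pvKeys s r, PySem.Set.ofList (pvF s r))
      = (pvKeys s (r + 1), PySem.Set.ofList (pvF s (r + 1))) := by
  have hn : (PySem.Set.ofList (pvF s r)).foldl (fun acc p => pvExts p.1 p.2 acc) PySem.Set.empty
      = PySem.Set.ofList (pvF s (r + 1)) := by
    rw [foldl_pvExts]
    have h1 := pv_update_flatMap_ofList (fun p => pvExtL p.1 p.2) (pvF s r) PySem.Set.empty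
    rw [show (PySem.Set.update PySem.Set.empty = PySem.Set.ofList) from rfl] at h1 ⊢
    rw [h1]
    rfl
  show (_, _) = _
  rw [hn]
  rfl

theorem pvIter (s : List Char) :
    ∀ r, pvStep^[r] (([] : List String), [(([] : List Char), s)])
      = (pvKeys s r, PySem.Set.ofList (pvF s r)) := by
  intro r
  induction r with
  | zero => rfl
  | succ r ih => rw [Function.iterate_succ_apply', ih, pvStep_eq]

theorem ofList_pvKeys (s : List Char) :
    ∀ r, PySem.Set.ofList (pvKeys s r) = PySem.Set.ofList (pvKK s r) := by
  intro r
  induction r with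
  | zero => rfl
  | succ r ih =>
      rw [pvKeys, PySem.Set.ofList_append, ih, pv_update_map_ofList, map_key_pvF,
        ← PySem.Set.ofList_append]
      rfl

theorem B_eq (iterable : String) :
    unique_powerset_of_string_alt iterable
      = PySem.Set.ofList (pvKK iterable.toList iterable.toList.length) := by
  show PySem.Set.ofList ((PySem.List.pyRange 0 ((iterable.toList.length : Int)) 1).foldl
      (fun st _ => pvStep st) (([] : List String), [(([] : List Char), iterable.toList)])).1 = _
  rw [foldl_const]
  have hlen : (PySem.List.pyRange 0 ((iterable.toList.length : Int)) 1).length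
      = iterable.toList.length := by
    rw [PySem.List.length_pyRange_one]
    simp
  rw [hlen, pvIter, ofList_pvKeys]

-- ===== VERDICT (by name: the statement is the Claim_ definition above) =====
theorem unique_powerset_of_string_spec : Claim_equal_unique_powerset_of_string := by
  intro iterable _
  unfold Spec_unique_powerset_of_string
  rw [A_eq, B_eq]
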